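-- pv_equiv track=rewrite | github.com/sundaramoorthygsy/AI | Simple perceptron model-practice.py | forward_pass
-- ===== SOURCE A (Python) =====
-- x1=[10,20,30]
--
-- x2=[15,25,35]
--
-- y=[50,60,70]
--
-- n=len(y)
--
-- def forward_pass(w1, w2, b):
--     y_pred =list()
--     y_pred =list()
--     total_error = 0
--     for i in range(n):
--         y_hat = w1* x1[i] + w2* x2[i] + b
--         y_pred.append(y_hat)
--
--         E = (y[i] - y_hat)**2
--         total_error+=E
--     return y_pred, total_error
-- ===== SOURCE B (Python) =====
-- x1=[10,20,30]
-- x2=[15,25,35]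
-- y=[50,60,70]
-- n=len(y)
--
-- def forward_pass(w1, w2, b):
--     # structural recursion over zipped rows: no indices, no range, no mutation
--     def go(rows):
--         if not rows:
--             return [], 0
--         (a, c, t) = rows[0]
--         yh = w1*a + w2*c + b
--         preds, err = go(rows[1:])
--         return [yh] + preds, (t - yh)**2 + err
--     return go(list(zip(x1, x2, y)))
-- ===== Notes on version B (the rewrite author's own statement) =====
-- stated objective: alternative
-- what changed: Replaces A's index-driven fused accumulation loop over range(n) with structural recursion over the zipped rows zip(x1,x2,y): no indexing, predictions assembled by consing on the way back out of the recursion and the error summed right-to-left by the recursive calls.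
import Mathlib
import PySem

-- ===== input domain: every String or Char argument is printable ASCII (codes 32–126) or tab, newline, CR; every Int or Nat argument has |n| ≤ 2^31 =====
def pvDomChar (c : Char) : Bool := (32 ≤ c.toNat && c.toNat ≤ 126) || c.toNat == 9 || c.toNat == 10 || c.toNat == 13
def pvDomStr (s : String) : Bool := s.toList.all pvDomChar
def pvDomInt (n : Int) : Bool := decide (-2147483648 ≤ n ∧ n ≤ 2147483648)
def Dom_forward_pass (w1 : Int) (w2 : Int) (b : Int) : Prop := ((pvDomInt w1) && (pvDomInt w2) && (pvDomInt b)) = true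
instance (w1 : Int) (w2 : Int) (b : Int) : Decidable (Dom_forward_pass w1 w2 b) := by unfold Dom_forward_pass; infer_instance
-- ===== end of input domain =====

-- B replaces A's index-driven fused loop with structural recursion over the zipped rows (cons on the way back).


-- module-level constants shared by both ports
def pvX1 : List Int := [10, 20, 30]
def pvX2 : List Int := [15, 25, 35]
def pvY : List Int := [50, 60, 70]
def pvN : Int := Int.ofNat pvY.length

-- ===== PORT A =====
-- one fused loop over range(n): append y_hat and add (y[i]-y_hat)^2 into the same state
def forward_pass (w1 : Int) (w2 : Int) (b : Int) : List Int × Int :=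
  (PySem.List.pyRange 0 pvN 1).foldl
    (fun (st : List Int × Int) i =>
      let y_hat := w1 * (PySem.List.pyGetD pvX1 i 0) + w2 * (PySem.List.pyGetD pvX2 i 0) + b
      let E := (PySem.List.pyGetD pvY i 0 - y_hat) ^ 2
      (st.1 ++ [y_hat], st.2 + E))
    ([], 0)

-- ===== PORT B =====
-- structural recursion over the zipped rows; predictions consed on the way back, error summed right-to-left
def forwardGo (w1 w2 b : Int) : List (Int × Int × Int) → List Int × Int
  | [] => ([], 0)
  | (a, c, t) :: rest =>
    let yh := w1 * a + w2 * c + b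
    let r := forwardGo w1 w2 b rest
    (yh :: r.1, (t - yh) ^ 2 + r.2)

def forward_pass_alt (w1 : Int) (w2 : Int) (b : Int) : List Int × Int :=
  forwardGo w1 w2 b (pvX1.zip (pvX2.zip pvY))

-- ===== PRECONDITION & SPEC =====
def Spec_forward_pass (w1 : Int) (w2 : Int) (b : Int) (out : List Int × Int) : Prop := out = forward_pass_alt w1 w2 b
instance (w1 : Int) (w2 : Int) (b : Int) (out : List Int × Int) : Decidable (Spec_forward_pass w1 w2 b out) := by unfold Spec_forward_pass; infer_instance

-- ===== CLAIM =====
def Claim_equal_forward_pass : Prop := ∀ (w1 : Int) (w2 : Int) (b : Int), Dom_forward_pass w1 w2 b → Spec_forward_pass w1 w2 b (forward_pass w1 w2 b)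

-- ===== LEMMAS AND PROOFS =====

-- ===== VERDICT =====
theorem forward_pass_spec : Claim_equal_forward_pass := by
  intro w1 w2 b _
  show forward_pass w1 w2 b = forward_pass_alt w1 w2 b
  simp [forward_pass, forward_pass_alt, forwardGo, pvX1, pvX2, pvY, pvN,
    PySem.List.pyRange, PySem.List.pyGetD, PySem.List.pyGet?, PySem.List.pyIdx?,
    List.range_succ]
  ring
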